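-- pv_equiv track=rewrite | github.com/nsa1im/lib-management-backend | CalculateDays/dayCalculator.py | get_month_days
-- ===== SOURCE A (Python) =====
-- def get_month_days(month, year):
--     months = [0, 1, 2, 3, 4, 5, 6, 7, 8, 9, 10, 11]
--     days = [31, 28, 31, 30, 31, 30, 31, 31, 30, 31, 30, 31]
--     total_days = 0
--     for i in range(months[month]+1):
--         total_days += days[i]
--     if(year%4 == 0 and month >= 2):
--         total_days += 1
--     return total_days
-- ===== SOURCE B (Python) =====
-- CUMULATIVE = [31, 59, 90, 120, 151, 181, 212, 243, 273, 304, 334, 365]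
--
-- def get_month_days(month, year):
--     total_days = CUMULATIVE[month]
--     if year % 4 == 0 and month >= 2:
--         total_days += 1
--     return total_days
-- ===== Notes on version B (the rewrite author's own statement) =====
-- stated objective: simpler
-- what changed: Replaces the per-month summing loop (and the redundant identity list 'months') with a single index into a precomputed cumulative-days table of length 12, keeping the same leap-year conditional.
import Mathlib
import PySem

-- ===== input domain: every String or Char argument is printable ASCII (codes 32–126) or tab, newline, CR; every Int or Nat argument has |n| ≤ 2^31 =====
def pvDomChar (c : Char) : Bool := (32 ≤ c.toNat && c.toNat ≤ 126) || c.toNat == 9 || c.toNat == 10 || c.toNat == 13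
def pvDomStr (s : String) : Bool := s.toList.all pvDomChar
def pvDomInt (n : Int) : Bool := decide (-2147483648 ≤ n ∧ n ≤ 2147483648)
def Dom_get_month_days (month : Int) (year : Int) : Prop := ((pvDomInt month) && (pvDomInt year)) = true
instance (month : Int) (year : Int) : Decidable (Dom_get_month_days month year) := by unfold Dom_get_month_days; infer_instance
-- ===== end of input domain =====

-- B replaces A's per-month summing loop by one index into a precomputed cumulative table (same leap conditional).

-- ===== PORT A =====
def get_month_days (month : Int) (year : Int) : Int :=
  let months : List Int := [0, 1, 2, 3, 4, 5, 6, 7, 8, 9, 10, 11]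
  let days : List Int := [31, 28, 31, 30, 31, 30, 31, 31, 30, 31, 30, 31]
  let total_days : Int := 0
  let total_days :=
    (PySem.List.pyRange 0 (PySem.List.pyGetD months month 0 + 1) 1).foldl
      (fun acc i => acc + PySem.List.pyGetD days i 0) total_days
  let total_days := if PySem.Int.mod year 4 = 0 ∧ month ≥ 2 then total_days + 1 else total_days
  total_days

-- ===== PORT B =====
def pvCumulative : List Int := [31, 59, 90, 120, 151, 181, 212, 243, 273, 304, 334, 365]

def get_month_days_alt (month : Int) (year : Int) : Int :=
  let total_days : Int := PySem.List.pyGetD pvCumulative month 0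
  let total_days := if PySem.Int.mod year 4 = 0 ∧ month ≥ 2 then total_days + 1 else total_days
  total_days

-- ===== PRECONDITION & SPEC =====
-- Pre_ excludes exactly the months outside [-12, 11], on which both A and B raise IndexError.
def Pre_get_month_days (month : Int) (year : Int) : Prop := -12 ≤ month ∧ month < 12
instance (month : Int) (year : Int) : Decidable (Pre_get_month_days month year) := by unfold Pre_get_month_days; infer_instance
def pvWitness_get_month_days : Int × Int := (5, 2024)

def Spec_get_month_days (month : Int) (year : Int) (out : Int) : Prop := out = get_month_days_alt month year
instance (month : Int) (year : Int) (out : Int) : Decidable (Spec_get_month_days month year out) := by unfold Spec_get_month_days; infer_instance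

-- ===== CLAIM (what is proved, stated in full; the proofs are below) =====
def Claim_equal_get_month_days : Prop := ∀ (month : Int) (year : Int), Dom_get_month_days month year → Pre_get_month_days month year → Spec_get_month_days month year (get_month_days month year)

-- ===== LEMMAS AND PROOFS =====

-- the loop's base sum agrees with the table entry for every month admitted by Pre_
theorem pv_base_eq (month : Int) (h1 : -12 ≤ month) (h2 : month < 12) :
    (PySem.List.pyRange 0 (PySem.List.pyGetD ([0, 1, 2, 3, 4, 5, 6, 7, 8, 9, 10, 11] : List Int) month 0 + 1) 1).foldl
      (fun acc i => acc + PySem.List.pyGetD ([31, 28, 31, 30, 31, 30, 31, 31, 30, 31, 30, 31] : List Int) i 0) 0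
    = PySem.List.pyGetD pvCumulative month 0 := by
  interval_cases month <;> decide

-- ===== VERDICT (by name: the statement is the Claim_ definition above) =====
theorem get_month_days_spec : Claim_equal_get_month_days := by
  intro month year _ hpre
  obtain ⟨h1, h2⟩ := hpre
  unfold Spec_get_month_days get_month_days get_month_days_alt
  simp only [pv_base_eq month h1 h2]
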